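-- pv_equiv track=rewrite | github.com/hltdi/HornMorpho | src/hm/proc.py | get_root_form_pattern
-- ===== SOURCE A (Python) =====
-- def get_root_form_pattern(forms):
--     '''
--     forms is a list of
--     returns:
--     '''
--     s = ''
--     for pos in [(0,), (1,), (4,), (7,), (2,5), (3,6), (8,)]:
--         x = '0'
--         for p in pos:
--             if len(forms) > p:
--                if forms[p] == '1':
--                    x = '1'
--                    break
--         s += x
--     return s
-- ===== SOURCE B (Python) =====
-- # Scatter version: invert the fixed group table into an index->slot map,
-- # start from seven '0's and set slots while scanning the input once.
-- _SLOT = {0: 0, 1: 1, 4: 2, 7: 3, 2: 4, 5: 4, 3: 5, 6: 5, 8: 6}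
--
-- def get_root_form_pattern(forms):
--     out = ['0'] * 7
--     for i, f in enumerate(forms):
--         if i in _SLOT and f == '1':
--             out[_SLOT[i]] = '1'
--     return ''.join(out)
-- ===== Notes on version B (the rewrite author's own statement) =====
-- stated objective: alternative
-- what changed: Replaces the gather over the constant position groups (nested loops with break) by a single scatter pass over the input: the group table is inverted into an index-to-slot dict, a seven-'0' list is allocated, and one enumerate loop sets slots for matching indices.
import Mathlib
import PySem

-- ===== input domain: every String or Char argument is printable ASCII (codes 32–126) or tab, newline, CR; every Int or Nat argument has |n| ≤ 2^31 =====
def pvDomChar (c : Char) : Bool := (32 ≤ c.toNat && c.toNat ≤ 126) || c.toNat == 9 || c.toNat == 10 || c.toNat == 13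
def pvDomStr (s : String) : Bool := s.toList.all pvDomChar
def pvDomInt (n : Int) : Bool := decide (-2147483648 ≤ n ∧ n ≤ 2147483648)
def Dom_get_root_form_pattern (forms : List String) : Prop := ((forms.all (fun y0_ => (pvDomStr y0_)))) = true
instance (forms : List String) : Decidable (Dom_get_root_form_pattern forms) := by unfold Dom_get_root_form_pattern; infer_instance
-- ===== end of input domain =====

-- B replaces A's gather over constant position groups by one scatter pass over the
-- input through an inverted index→slot map (objective: alternative; same cost).

-- ===== PORT A =====
-- inner 'for p in pos' loop: x = '1' and break on the first matching p, else '0'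
def pvInnerA (forms : List String) : List Int → String
  | [] => "0"
  | p :: rest =>
    if (forms.length : Int) > p then
      if PySem.List.pyGet? forms p = some "1" then "1"
      else pvInnerA forms rest
    else pvInnerA forms rest

def get_root_form_pattern (forms : List String) : String :=
  [[(0 : Int)], [1], [4], [7], [2, 5], [3, 6], [8]].foldl
    (fun s pos => s ++ pvInnerA forms pos) ""

-- ===== PORT B =====
-- _SLOT: a literal dict with distinct int keys; List.lookup on this literal
-- association list is exactly Python's dict membership test / lookup here.
def pvSlot : List (Int × Nat) := [(0, 0), (1, 1), (4, 2), (7, 3), (2, 4), (5, 4), (3, 5), (6, 5), (8, 6)]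

-- loop body: 'if i in _SLOT and f == "1": out[_SLOT[i]] = "1"'
def pvStepB (out : List Char) (p : Int × String) : List Char :=
  match pvSlot.lookup p.1 with
  | some j => if p.2 = "1" then out.set j '1' else out
  | none => out

def get_root_form_pattern_alt (forms : List String) : String :=
  String.ofList ((PySem.List.enumerate forms).foldl pvStepB (List.replicate 7 '0'))

-- ===== PRECONDITION & SPEC =====
def Spec_get_root_form_pattern (forms : List String) (out : String) : Prop := out = get_root_form_pattern_alt forms
instance (forms : List String) (out : String) : Decidable (Spec_get_root_form_pattern forms out) := by unfold Spec_get_root_form_pattern; infer_instance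

-- ===== CLAIM (what is proved, stated in full; the proofs are below) =====
def Claim_equal_get_root_form_pattern : Prop := ∀ (forms : List String), Dom_get_root_form_pattern forms → Spec_get_root_form_pattern forms (get_root_form_pattern forms)

-- ===== LEMMAS AND PROOFS =====
-- predicate: input entry (i, f) sets output slot j
def pvPredB (j : Nat) (p : Int × String) : Bool :=
  (pvSlot.lookup p.1 == some j) && (p.2 == "1")

def pvBchar (forms : List String) (j : Nat) : Char :=
  if (PySem.List.enumerate forms 0).any (pvPredB j) then '1' else '0'

theorem pvStepB_length (L : List Char) (p : Int × String) : (pvStepB L p).length = L.length := by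
  unfold pvStepB
  rcases pvSlot.lookup p.1 with _ | j <;> simp <;> split <;> simp

theorem pvFold_length (xs : List (Int × String)) (L : List Char) :
    (xs.foldl pvStepB L).length = L.length := by
  induction xs generalizing L with
  | nil => rfl
  | cons p xs ih => rw [List.foldl_cons, ih, pvStepB_length]

theorem pvFold_get (xs : List (Int × String)) (L : List Char) (j : Nat) (hj : j < L.length) :
    (xs.foldl pvStepB L)[j]? = if xs.any (pvPredB j) then some '1' else L[j]? := by
  induction xs generalizing L with
  | nil => simp
  | cons p xs ih =>
    rw [List.foldl_cons, List.any_cons]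
    rcases hl : pvSlot.lookup p.1 with _ | k
    · have hstep : pvStepB L p = L := by simp [pvStepB, hl]
      have hpred : pvPredB j p = false := by simp [pvPredB, hl]
      rw [hstep, hpred, Bool.false_or, ih L hj]
    · by_cases hf : p.2 = "1"
      · have hstep : pvStepB L p = L.set k '1' := by simp [pvStepB, hl, hf]
        rw [hstep, ih (L.set k '1') (by simpa using hj)]
        by_cases hjj : k = j
        · subst hjj
          have hpred : pvPredB k p = true := by simp [pvPredB, hl, hf]
          have hget : (L.set k '1')[k]? = some '1' := by
            rw [List.getElem?_set_self]; simp [hj]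
          rw [hpred, Bool.true_or, if_pos rfl, hget]
          split <;> rfl
        · have hpred : pvPredB j p = false := by simp [pvPredB, hl, hf, hjj]
          have hget : (L.set k '1')[j]? = L[j]? := List.getElem?_set_ne (by omega)
          rw [hpred, Bool.false_or, hget]
      · have hstep : pvStepB L p = L := by simp [pvStepB, hl, hf]
        have hpred : pvPredB j p = false := by simp [pvPredB, hf]
        rw [hstep, hpred, Bool.false_or, ih L hj]

theorem pvAlt_eq (forms : List String) :
    get_root_form_pattern_alt forms =
      String.ofList [pvBchar forms 0, pvBchar forms 1, pvBchar forms 2, pvBchar forms 3,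
                 pvBchar forms 4, pvBchar forms 5, pvBchar forms 6] := by
  unfold get_root_form_pattern_alt
  congr 1
  apply List.ext_getElem?
  intro j
  by_cases hj : j < 7
  · rw [pvFold_get _ _ j (by simpa using hj)]
    unfold pvBchar
    interval_cases j <;> split <;> simp
  · have h1 : ((PySem.List.enumerate forms).foldl pvStepB (List.replicate 7 '0')).length = 7 := by
      rw [pvFold_length]; simp
    rw [List.getElem?_eq_none (by omega), List.getElem?_eq_none (by simp; omega)]

-- lookup in the literal map, characterised by membership
theorem pvSlot_lookup_mem (n : Int) (v : Nat) :
    List.lookup n pvSlot = some v ↔ (n, v) ∈ pvSlot := by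
  constructor
  · intro h
    simp only [pvSlot, List.lookup] at h
    repeat' split at h <;> simp_all [pvSlot]
  · intro h
    simp only [pvSlot, List.mem_cons, List.not_mem_nil, or_false, Prod.mk.injEq] at h
    rcases h with ⟨rfl, rfl⟩ | ⟨rfl, rfl⟩ | ⟨rfl, rfl⟩ | ⟨rfl, rfl⟩ | ⟨rfl, rfl⟩
      | ⟨rfl, rfl⟩ | ⟨rfl, rfl⟩ | ⟨rfl, rfl⟩ | ⟨rfl, rfl⟩ <;> rfl

-- A's inner loop returns '1' exactly when some listed position holds "1"
theorem pvInnerA_char (forms : List String) (ps : List Int) (hps : ∀ p ∈ ps, 0 ≤ p) :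
    pvInnerA forms ps
      = if ∃ p ∈ ps, PySem.List.pyGet? forms p = some "1" then "1" else "0" := by
  induction ps with
  | nil => simp [pvInnerA]
  | cons p ps ih =>
    have ih' := ih (fun q hq => hps q (List.mem_cons_of_mem _ hq))
    have h0 : 0 ≤ p := hps p (List.mem_cons_self)
    obtain ⟨n, rfl⟩ := Int.eq_ofNat_of_zero_le h0
    by_cases h1 : PySem.List.pyGet? forms (n : Int) = some "1"
    · have hn : n < forms.length := by
        have h := h1
        rw [PySem.List.pyGet?_natCast] at h
        exact (List.getElem?_eq_some_iff.mp h).1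
      have hc : (forms.length : Int) > (n : Int) := by exact_mod_cast hn
      simp only [pvInnerA]
      rw [if_pos hc, if_pos h1, if_pos ⟨(n : Int), List.mem_cons_self, h1⟩]
    · have hstep : pvInnerA forms ((n : Int) :: ps) = pvInnerA forms ps := by
        by_cases hc : (forms.length : Int) > (n : Int)
        · simp only [pvInnerA, if_pos hc, if_neg h1]
        · simp only [pvInnerA, if_neg hc]
      have hcond : (∃ q ∈ (n : Int) :: ps, PySem.List.pyGet? forms q = some "1")
          ↔ (∃ q ∈ ps, PySem.List.pyGet? forms q = some "1") := by
        constructor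
        · rintro ⟨q, hq, hP⟩
          rcases List.mem_cons.mp hq with rfl | hq'
          · exact absurd hP h1
          · exact ⟨q, hq', hP⟩
        · rintro ⟨q, hq, hP⟩
          exact ⟨q, List.mem_cons_of_mem _ hq, hP⟩
      rw [hstep, ih']
      simp only [hcond]

-- B's slot j holds '1' exactly when some position mapped to j holds "1"
theorem pvBchar_char (forms : List String) (j : Nat) (ms : List Int)
    (hms0 : ∀ m ∈ ms, 0 ≤ m)
    (hms : ∀ n : Int, List.lookup n pvSlot = some j ↔ n ∈ ms) :
    pvBchar forms j
      = if ∃ m ∈ ms, PySem.List.pyGet? forms m = some "1" then '1' else '0' := by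
  unfold pvBchar
  by_cases hC : ∃ m ∈ ms, PySem.List.pyGet? forms m = some "1"
  · obtain ⟨m, hm, hget⟩ := hC
    obtain ⟨k, rfl⟩ := Int.eq_ofNat_of_zero_le (hms0 m hm)
    rw [PySem.List.pyGet?_natCast] at hget
    obtain ⟨hk, hkeq⟩ := List.getElem?_eq_some_iff.mp hget
    have hany : (PySem.List.enumerate forms 0).any (pvPredB j) = true := by
      rw [List.any_eq_true]
      refine ⟨((k : Int), forms[k]), ?_, ?_⟩
      · rw [PySem.List.mem_enumerate_iff]
        exact ⟨k, hk, by norm_num⟩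
      · simp [pvPredB, (hms (k : Int)).mpr hm, hkeq]
    simp only [hany, if_pos]
    rw [if_pos ⟨(k : Int), hm, by rw [PySem.List.pyGet?_natCast, hget]⟩]
  · have hany : (PySem.List.enumerate forms 0).any (pvPredB j) = false := by
      rw [List.any_eq_false]
      intro x hx
      rw [PySem.List.mem_enumerate_iff] at hx
      obtain ⟨k, hk, rfl⟩ := hx
      simp only [pvPredB, Bool.and_eq_true, beq_iff_eq, not_and]
      intro hlk hkeq
      rw [show ((0 : Int) + (k : Nat) = (k : Nat)) from by omega] at hlk
      exact absurd ⟨(k : Int), (hms (k : Int)).mp hlk,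
        by rw [PySem.List.pyGet?_natCast]; exact List.getElem?_eq_some_iff.mpr ⟨hk, hkeq⟩⟩ hC
    simp [hany, hC]

-- ===== VERDICT (by name: the statement is the Claim_ definition above) =====
theorem get_root_form_pattern_spec : Claim_equal_get_root_form_pattern := by
  intro forms _
  show get_root_form_pattern forms = get_root_form_pattern_alt forms
  rw [pvAlt_eq,
    pvBchar_char forms 0 [0] (by decide) (fun n => by rw [pvSlot_lookup_mem]; simp [pvSlot]),
    pvBchar_char forms 1 [1] (by decide) (fun n => by rw [pvSlot_lookup_mem]; simp [pvSlot]),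
    pvBchar_char forms 2 [4] (by decide) (fun n => by rw [pvSlot_lookup_mem]; simp [pvSlot]),
    pvBchar_char forms 3 [7] (by decide) (fun n => by rw [pvSlot_lookup_mem]; simp [pvSlot]),
    pvBchar_char forms 4 [2, 5] (by decide) (fun n => by rw [pvSlot_lookup_mem]; simp [pvSlot]),
    pvBchar_char forms 5 [3, 6] (by decide) (fun n => by rw [pvSlot_lookup_mem]; simp [pvSlot]),
    pvBchar_char forms 6 [8] (by decide) (fun n => by rw [pvSlot_lookup_mem]; simp [pvSlot])]
  unfold get_root_form_pattern
  simp only [List.foldl_cons, List.foldl_nil]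
  rw [pvInnerA_char forms [0] (by decide), pvInnerA_char forms [1] (by decide),
    pvInnerA_char forms [4] (by decide), pvInnerA_char forms [7] (by decide),
    pvInnerA_char forms [2, 5] (by decide), pvInnerA_char forms [3, 6] (by decide),
    pvInnerA_char forms [8] (by decide)]
  split_ifs <;> rfl
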